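-- pv_equiv track=rewrite | github.com/ScrappinR/phantom-detect | experiments/bounty_poc/test_v2.py | has_opening_question
-- ===== SOURCE A (Python) =====
-- def has_opening_question(text):
--     """Check if response opens with a question."""
--     import re
--     lines = text.strip().split('\n')
--     for line in lines:
--         line = line.strip()
--         if line:
--             return line.endswith('?')
--     return False
-- ===== SOURCE B (Python) =====
-- def has_opening_question(text):
--     """Check if response opens with a question."""
--     last = ''
--     for ch in text:
--         if ch == '\n' and last:
--             break
--         if not ch.isspace():
--             last = ch
--     return last == '?'
-- ===== Notes on version B (the rewrite author's own statement) =====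
-- stated objective: alternative
-- what changed: Replaces A's strip-then-split-then-loop-over-lines pipeline (which builds the whole line list) by a single streaming character scan of the raw text that tracks the last non-whitespace character and stops at the first line break after content, comparing that character to '?'.
import Mathlib
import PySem

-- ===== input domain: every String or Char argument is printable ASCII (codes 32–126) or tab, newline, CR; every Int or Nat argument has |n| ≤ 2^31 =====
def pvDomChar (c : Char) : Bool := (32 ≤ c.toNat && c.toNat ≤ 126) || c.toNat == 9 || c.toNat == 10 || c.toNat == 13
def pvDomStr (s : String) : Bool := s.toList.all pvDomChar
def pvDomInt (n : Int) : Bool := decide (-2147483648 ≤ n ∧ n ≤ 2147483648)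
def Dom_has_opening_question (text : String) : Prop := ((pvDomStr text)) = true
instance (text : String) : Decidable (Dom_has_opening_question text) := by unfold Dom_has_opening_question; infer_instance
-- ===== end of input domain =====

-- B replaces A's strip/split/per-line loop by one streaming scan of the raw characters
-- that tracks the last non-whitespace character before the first line break (alternative decomposition; return value only).

-- ===== PORT A =====
-- A's for-loop over the split lines: first line that is non-empty after strip decides the result.
def hoqLoop : List (List Char) → Bool
  | [] => false
  | l :: ls =>
    let line := PySem.Chars.strip l
    if line ≠ [] then PySem.Chars.endswith line ['?'] else hoqLoop ls

def has_opening_question (text : String) : Bool :=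
  let lines := PySem.Chars.splitOn (PySem.Chars.strip text.toList) ['\n']
  hoqLoop lines

-- ===== PORT B =====
-- the for-loop of Source B: `last` is '' (= []) or the single last non-space char seen so far;
-- break at a '\n' once `last` is truthy, update `last` on every non-space char.
def hoqScan : List Char → List Char → List Char
  | last, [] => last
  | last, c :: t =>
    if c == '\n' && !last.isEmpty then last
    else if !(PySem.Chars.isspace c) then hoqScan [c] t
    else hoqScan last t

def has_opening_question_alt (text : String) : Bool :=
  hoqScan [] text.toList == ['?']

-- ===== PRECONDITION & SPEC =====
def Spec_has_opening_question (text : String) (out : Bool) : Prop := out = has_opening_question_alt text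
instance (text : String) (out : Bool) : Decidable (Spec_has_opening_question text out) := by unfold Spec_has_opening_question; infer_instance

-- ===== CLAIM (what is proved, stated in full; the proofs are below) =====
def Claim_equal_has_opening_question : Prop := ∀ (text : String), Dom_has_opening_question text → Spec_has_opening_question text (has_opening_question text)

-- ===== LEMMAS AND PROOFS =====

-- the accumulator of splitOn.go is a reversed prefix of the final result
theorem splitOn_go_acc : ∀ (fuel : Nat) (l cur : List Char) (acc : List (List Char)),
    PySem.Chars.splitOn.go ['\n'] fuel l cur acc =
      acc.reverse ++ PySem.Chars.splitOn.go ['\n'] fuel l cur [] := by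
  intro fuel
  induction fuel with
  | zero => intro l cur acc; simp [PySem.Chars.splitOn.go]
  | succ f ih =>
    intro l cur acc
    cases l with
    | nil => simp [PySem.Chars.splitOn.go]
    | cons c t =>
      simp only [PySem.Chars.splitOn.go]
      by_cases hp : List.isPrefixOf ['\n'] (c :: t) = true
      · rw [if_pos hp, if_pos hp, ih _ _ (cur.reverse :: acc), ih _ _ [cur.reverse]]
        simp
      · rw [if_neg hp, if_neg hp, ih _ _ acc]

-- first segment produced by splitOn.go is the take-until-'\n' part
theorem splitOn_go_head : ∀ (fuel : Nat) (l cur : List Char) (acc : List (List Char)), l.length < fuel →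
    ∃ rest, PySem.Chars.splitOn.go ['\n'] fuel l cur acc =
      acc.reverse ++ (cur.reverse ++ l.takeWhile (· != '\n')) :: rest := by
  intro fuel
  induction fuel with
  | zero => intro l cur acc h; omega
  | succ f ih =>
    intro l cur acc h
    cases l with
    | nil => exact ⟨[], by simp [PySem.Chars.splitOn.go]⟩
    | cons c t =>
      by_cases hp : List.isPrefixOf ['\n'] (c :: t) = true
      · have hc : c = '\n' := by
          simp [List.isPrefixOf] at hp
          exact hp.symm
        subst hc
        refine ⟨PySem.Chars.splitOn.go ['\n'] f t [] [], ?_⟩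
        simp only [PySem.Chars.splitOn.go]
        rw [if_pos hp, splitOn_go_acc]
        simp
      · have hc : c ≠ '\n' := by
          intro e; subst e
          exact hp (by simp [List.isPrefixOf])
        obtain ⟨rest, hr⟩ := ih t (c :: cur) acc (by simp at h ⊢; omega)
        refine ⟨rest, ?_⟩
        simp only [PySem.Chars.splitOn.go]
        rw [if_neg hp, hr]
        simp [hc]

-- stripping a string whose first char is non-space keeps it non-empty
theorem strip_cons_nonspace (c : Char) (t : List Char) (h : PySem.Chars.isspace c = false) :
    PySem.Chars.strip (c :: t) ≠ [] := by
  intro he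
  simp only [PySem.Chars.strip, PySem.Chars.lstrip, PySem.Chars.rstrip,
    List.dropWhile_cons, h, Bool.false_eq_true, if_false, List.reverse_eq_nil_iff,
    List.dropWhile_eq_nil_iff] at he
  have := he c (by simp)
  simp [h] at this

-- a stripped string is empty or starts with a non-space character
theorem strip_head (u : List Char) :
    PySem.Chars.strip u = [] ∨
    ∃ c t, PySem.Chars.strip u = c :: t ∧ PySem.Chars.isspace c = false := by
  cases hs : PySem.Chars.strip u with
  | nil => exact Or.inl rfl
  | cons c t =>
    refine Or.inr ⟨c, t, rfl, ?_⟩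
    have hpre : PySem.Chars.strip u <+: PySem.Chars.lstrip u := by
      simp only [PySem.Chars.strip, PySem.Chars.rstrip]
      rw [← List.reverse_suffix]
      simp [List.dropWhile_suffix]
    rw [hs] at hpre
    obtain ⟨r, hr⟩ := hpre
    have hd : u.dropWhile PySem.Chars.isspace = c :: (t ++ r) := by simpa using hr.symm
    have := List.head?_dropWhile_not PySem.Chars.isspace u
    rw [hd] at this
    simpa using this

-- `endswith · ['?']` is a test on the last element
theorem endswith_q (w : List Char) :
    PySem.Chars.endswith w ['?'] = (w.getLast? == some '?') := by
  rcases eq_or_ne w.getLast? (some '?') with h | h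
  · obtain ⟨ys, rfl⟩ := List.getLast?_eq_some_iff.mp h
    rw [h, show (some '?' == some '?') = true from rfl]
    exact (PySem.Chars.endswith_iff _ _).mpr ⟨ys, rfl⟩
  · have h2 : (w.getLast? == some '?') = false := by simpa using h
    rw [h2, Bool.eq_false_iff]
    intro he
    rw [PySem.Chars.endswith_iff _ _] at he
    obtain ⟨s, hs⟩ := he
    exact h (by rw [← hs]; exact List.getLast?_concat)

-- B's loop body as a fold step
def hoqStep (acc : List Char) (c : Char) : List Char :=
  if !(PySem.Chars.isspace c) then [c] else acc

-- while `last` is empty, the scan just skips whitespace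
theorem scan_drop : ∀ (u : List Char),
    hoqScan [] u = hoqScan [] (u.dropWhile PySem.Chars.isspace) := by
  intro u
  induction u with
  | nil => rfl
  | cons c t ih =>
    by_cases hc : PySem.Chars.isspace c = true
    · rw [List.dropWhile_cons_of_pos hc]
      rw [show hoqScan [] (c :: t) = hoqScan [] t by simp [hoqScan, hc]]
      exact ih
    · rw [List.dropWhile_cons_of_neg hc]

-- once `last` is a single char, the scan is a fold of hoqStep over the first line
theorem scan_fold : ∀ (t : List Char) (d : Char),
    hoqScan [d] t = List.foldl hoqStep [d] (t.takeWhile (· != '\n')) := by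
  intro t
  induction t with
  | nil => intro d; rfl
  | cons c t ih =>
    intro d
    by_cases hc : c = '\n'
    · subst hc
      simp [hoqScan]
    · have hb : (c == '\n' && !(List.isEmpty [d])) = false := by simp [hc]
      have htw : (c :: t).takeWhile (· != '\n') = c :: t.takeWhile (· != '\n') := by
        simp [hc]
      rw [htw]
      by_cases hs : PySem.Chars.isspace c = true
      · rw [show hoqScan [d] (c :: t) = hoqScan [d] t by simp [hoqScan, hc, hs]]
        rw [ih d, List.foldl_cons]
        simp [hoqStep, hs]
      · rw [show hoqScan [d] (c :: t) = hoqScan [c] t by simp [hoqScan, hc, hs]]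
        rw [ih c, List.foldl_cons]
        simp [hoqStep, hs]

-- the fold computes the last non-space character (or keeps the initial state)
theorem foldl_lastNS : ∀ (l init : List Char),
    List.foldl hoqStep init l =
      (((l.reverse.dropWhile PySem.Chars.isspace).head?).map (fun d => [d])).getD init := by
  intro l
  induction l using List.reverseRecOn with
  | nil => intro init; simp
  | append_singleton l a ih =>
    intro init
    rw [List.foldl_append, List.reverse_append]
    by_cases hs : PySem.Chars.isspace a = true
    · simp only [List.foldl_cons, List.foldl_nil, hoqStep, hs, Bool.not_true]
      rw [if_neg (by simp)]
      rw [ih init]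
      simp [hs]
    · simp only [List.foldl_cons, List.foldl_nil, hoqStep]
      rw [if_pos (by simp [hs])]
      simp [hs]

-- trailing whitespace is like the whole decomposition: lstrip u = strip u ++ (all-space tail)
theorem lstrip_eq_strip_append (u : List Char) :
    ∃ z, u.dropWhile PySem.Chars.isspace = PySem.Chars.strip u ++ z ∧
      ∀ x ∈ z, PySem.Chars.isspace x = true := by
  refine ⟨((u.dropWhile PySem.Chars.isspace).reverse.takeWhile PySem.Chars.isspace).reverse, ?_, ?_⟩
  · simp only [PySem.Chars.strip, PySem.Chars.rstrip, PySem.Chars.lstrip]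
    rw [← List.reverse_append, List.takeWhile_append_dropWhile, List.reverse_reverse]
  · intro x hx
    rw [List.mem_reverse] at hx
    exact List.mem_takeWhile_imp hx

-- folding hoqStep over all-space input is the identity
theorem foldl_spaces : ∀ (w s : List Char), (∀ x ∈ w, PySem.Chars.isspace x = true) →
    List.foldl hoqStep s w = s := by
  intro w
  induction w with
  | nil => intro s _; rfl
  | cons c t ih =>
    intro s h
    rw [List.foldl_cons]
    have hc := h c (by simp)
    rw [show hoqStep s c = s by simp [hoqStep, hc]]
    exact ih s (fun x hx => h x (by simp [hx]))

-- ===== VERDICT (by name: the statement is the Claim_ definition above) =====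
theorem has_opening_question_spec : Claim_equal_has_opening_question := by
  intro text _
  unfold Spec_has_opening_question has_opening_question has_opening_question_alt
  rw [scan_drop]
  obtain ⟨z, hz, hzsp⟩ := lstrip_eq_strip_append text.toList
  rcases strip_head text.toList with hs | ⟨c, t, hs, hsp⟩
  · -- whole text is whitespace: both sides are false
    rw [hs] at hz
    have hznil : z = [] := by
      cases hz' : z with
      | nil => rfl
      | cons x xs =>
        rw [hz'] at hz
        have := List.head?_dropWhile_not PySem.Chars.isspace text.toList
        rw [hz] at this
        simp only [List.nil_append, List.head?_cons] at this
        have hx := hzsp x (by simp [hz'])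
        rw [hx] at this
        exact absurd this (by simp)
    rw [hznil] at hz
    simp only [List.append_nil] at hz
    rw [hz, hs]
    decide
  · -- strip text = c :: t with c non-space
    rw [hs] at hz
    have hc : c ≠ '\n' := by
      intro e; subst e; exact absurd hsp (by decide)
    -- A side: first segment of the split is c :: t.takeWhile (· != '\n')
    have hlen : (c :: t).length < (c :: t).length + 1 := by omega
    obtain ⟨rest, hA⟩ := splitOn_go_head ((c :: t).length + 1) (c :: t) [] [] hlen
    have hcne : (c != '\n') = true := by simpa using hc
    have hne := strip_cons_nonspace c (t.takeWhile (· != '\n')) hsp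
    have hAv : hoqLoop (PySem.Chars.splitOn (c :: t) ['\n']) =
        PySem.Chars.endswith (PySem.Chars.strip (c :: t.takeWhile (· != '\n'))) ['?'] := by
      simp only [PySem.Chars.splitOn]
      rw [hA]
      simp [hoqLoop, hcne, hne]
    rw [hs, hAv]
    -- B side: reduce the scan to a fold over c :: tk
    rw [hz]
    have hstep : hoqScan [] ((c :: t) ++ z) = hoqScan [c] (t ++ z) := by
      simp only [List.cons_append, hoqScan, List.isEmpty_nil, Bool.not_true, Bool.and_false,
        Bool.false_eq_true, if_false]
      rw [if_pos (by simp [hsp])]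
    rw [hstep, scan_fold]
    -- the fold over (t++z)'s first line equals the fold over t's first line
    have hfold : List.foldl hoqStep [c] ((t ++ z).takeWhile (· != '\n')) =
        List.foldl hoqStep [c] (t.takeWhile (· != '\n')) := by
      rw [List.takeWhile_append]
      by_cases hlenq : (t.takeWhile (· != '\n')).length = t.length
      · rw [if_pos hlenq]
        have htt : t.takeWhile (· != '\n') = t :=
          (List.takeWhile_prefix _).eq_of_length hlenq
        rw [List.foldl_append]
        rw [foldl_spaces _ _ (fun x hx => hzsp x (List.IsPrefix.mem hx (List.takeWhile_prefix _)))]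
        rw [htt]
      · rw [if_neg hlenq]
    rw [hfold]
    -- both sides are now a test on the last non-space char of c :: t.takeWhile (· != '\n')
    rw [show List.foldl hoqStep [c] (t.takeWhile (· != '\n')) =
        List.foldl hoqStep [] (c :: t.takeWhile (· != '\n')) by
      simp [List.foldl_cons, hoqStep, hsp]]
    rw [foldl_lastNS, endswith_q]
    simp only [PySem.Chars.strip, PySem.Chars.lstrip, PySem.Chars.rstrip]
    rw [List.dropWhile_cons_of_neg (by simp [hsp]), List.getLast?_reverse]
    rw [show (c :: t.takeWhile (· != '\n')).reverse = (t.takeWhile (· != '\n')).reverse ++ [c] by simp]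
    rw [List.dropWhile_append]
    cases hw : (t.takeWhile (· != '\n')).reverse.dropWhile PySem.Chars.isspace with
    | nil => simp [hsp]
    | cons d u' => simp
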